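-- pv_equiv track=rewrite | github.com/AK-Khan02/Machine-Learning-Projects | ML Algorithms/Algorithm Implementations/Convolution with Stride and Dilation.py | convolve_matrix
-- ===== SOURCE A (Python) =====
-- def convolve_matrix(matrix, kernel, stride):
--     output_rows = ((len(matrix) - len(kernel)) // stride) + 1
--     output_cols = ((len(matrix[0]) - len(kernel[0])) // stride) + 1
--
--     # Initialize the output matrix with zeros.
--     output_matrix = [[0 for _ in range(output_cols)] for _ in range(output_rows)]
--
--     # Slide the kernel over the matrix
--     for i in range(0, len(matrix) - len(kernel) + 1, stride):
--         for j in range(0, len(matrix[0]) - len(kernel[0]) + 1, stride):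
--             # Element-wise multiplication and sum
--             for ki in range(len(kernel)):
--                 for kj in range(len(kernel[0])):
--                     output_matrix[i // stride][j // stride] += matrix[i + ki][j + kj] * kernel[ki][kj]
--
--     return output_matrix
-- ===== SOURCE B (Python) =====
-- def convolve_matrix(matrix, kernel, stride):
--     # Shift-and-add: instead of gathering each output window, scatter each
--     # kernel weight over the whole output plane, rebuilding it functionally.
--     rows = (len(matrix) - len(kernel)) // stride + 1
--     cols = (len(matrix[0]) - len(kernel[0])) // stride + 1
--     out = [[0] * cols for _ in range(rows)]
--     for ki in range(len(kernel)):
--         for kj in range(len(kernel[0])):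
--             w = kernel[ki][kj]
--             out = [[acc + w * matrix[oi * stride + ki][oj * stride + kj]
--                     for oj, acc in enumerate(row)]
--                    for oi, row in enumerate(out)]
--     return out
-- ===== Notes on version B (the rewrite author's own statement) =====
-- stated objective: alternative
-- what changed: B replaces A's output-major gather (slide the window, accumulate each output cell in place, recovering its coordinates with i//stride) by a kernel-major shift-and-add scatter: for each kernel weight it rebuilds the whole output plane functionally, adding that weight times the correspondingly shifted strided slice of the input.
-- outside the precondition, e.g. on convolve_matrix([[1]], [[1]], -1): A returns [[0]], B returns [[1]]; on convolve_matrix([[1, 2, 3], [4, 5]], [[1]], 3): A returns [[1]], B returns [[1]]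
import Mathlib
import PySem

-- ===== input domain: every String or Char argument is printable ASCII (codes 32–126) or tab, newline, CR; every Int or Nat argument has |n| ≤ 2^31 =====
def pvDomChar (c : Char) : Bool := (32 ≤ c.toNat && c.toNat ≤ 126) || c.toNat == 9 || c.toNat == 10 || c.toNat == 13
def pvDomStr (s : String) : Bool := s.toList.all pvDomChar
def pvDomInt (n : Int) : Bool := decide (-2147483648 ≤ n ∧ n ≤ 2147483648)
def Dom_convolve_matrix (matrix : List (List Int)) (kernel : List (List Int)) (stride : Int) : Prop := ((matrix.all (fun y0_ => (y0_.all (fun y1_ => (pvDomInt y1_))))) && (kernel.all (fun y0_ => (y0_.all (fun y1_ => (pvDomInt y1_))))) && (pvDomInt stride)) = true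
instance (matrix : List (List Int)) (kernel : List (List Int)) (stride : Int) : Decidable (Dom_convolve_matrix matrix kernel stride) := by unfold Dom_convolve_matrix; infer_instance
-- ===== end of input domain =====

-- B is a kernel-major shift-and-add: for each kernel weight it rebuilds the whole
-- output plane, adding weight * shifted strided input entry to every cell, instead
-- of A's output-major window gather mutated in place; objective: alternative.


-- ===== PORT A =====
def convolve_matrix (matrix : List (List Int)) (kernel : List (List Int)) (stride : Int) : List (List Int) :=
  let output_rows : Int := PySem.Int.floordiv ((matrix.length : Int) - (kernel.length : Int)) stride + 1
  let output_cols : Int := PySem.Int.floordiv (((matrix.getD 0 []).length : Int) - ((kernel.getD 0 []).length : Int)) stride + 1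
  let init := (PySem.List.pyRange 0 output_rows 1).map (fun _ => (PySem.List.pyRange 0 output_cols 1).map (fun _ => (0 : Int)))
  (PySem.List.pyRange 0 ((matrix.length : Int) - (kernel.length : Int) + 1) stride).foldl (fun out i =>
    (PySem.List.pyRange 0 (((matrix.getD 0 []).length : Int) - ((kernel.getD 0 []).length : Int) + 1) stride).foldl (fun out j =>
      (PySem.List.pyRange 0 ((kernel.length : Int)) 1).foldl (fun out ki =>
        (PySem.List.pyRange 0 (((kernel.getD 0 []).length : Int)) 1).foldl (fun out kj =>
          out.modify (PySem.Int.floordiv i stride).toNat (fun row =>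
            row.modify (PySem.Int.floordiv j stride).toNat (fun v =>
              v + PySem.List.pyGetD (PySem.List.pyGetD matrix (i + ki) []) (j + kj) 0 *
                  PySem.List.pyGetD (PySem.List.pyGetD kernel ki []) kj 0))) out) out) out) init

-- ===== PORT B =====
-- pvUpd is Source B's plane-rebuilding comprehension for one kernel weight (ki,kj)
def pvUpd (matrix : List (List Int)) (stride w ki kj : Int) (out : List (List Int)) : List (List Int) :=
  (PySem.List.enumerate out).map (fun p =>
    (PySem.List.enumerate p.2).map (fun q =>
      q.2 + w * PySem.List.pyGetD (PySem.List.pyGetD matrix (p.1 * stride + ki) []) (q.1 * stride + kj) 0))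

def convolve_matrix_alt (matrix : List (List Int)) (kernel : List (List Int)) (stride : Int) : List (List Int) :=
  let rows : Int := PySem.Int.floordiv ((matrix.length : Int) - (kernel.length : Int)) stride + 1
  let cols : Int := PySem.Int.floordiv (((matrix.getD 0 []).length : Int) - ((kernel.getD 0 []).length : Int)) stride + 1
  let init := (PySem.List.pyRange 0 rows 1).map (fun _ => (PySem.List.pyRange 0 cols 1).map (fun _ => (0 : Int)))
  (PySem.List.pyRange 0 ((kernel.length : Int)) 1).foldl (fun out ki =>
    (PySem.List.pyRange 0 (((kernel.getD 0 []).length : Int)) 1).foldl (fun out kj =>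
      pvUpd matrix stride (PySem.List.pyGetD (PySem.List.pyGetD kernel ki []) kj 0) ki kj out) out) init

-- ===== PRECONDITION & SPEC =====
-- Pre_ restricts to the task's natural domain and to where the Python A returns:
-- stride >= 1 (stride 0 raises ZeroDivisionError; a negative stride is outside the
-- natural domain of a strided convolution and A's zero-filled results there are
-- artefacts of empty range()s), matrix and kernel nonempty ([0] raises IndexError),
-- and no row shorter than the first row of its matrix/kernel (on such ragged input
-- A in general raises IndexError; it returns only in degenerate never-accessed cases).
def Pre_convolve_matrix (matrix : List (List Int)) (kernel : List (List Int)) (stride : Int) : Prop :=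
  1 ≤ stride ∧ matrix ≠ [] ∧ kernel ≠ [] ∧
  (∀ row ∈ matrix, (matrix.getD 0 []).length ≤ row.length) ∧
  (∀ krow ∈ kernel, (kernel.getD 0 []).length ≤ krow.length)
instance (matrix : List (List Int)) (kernel : List (List Int)) (stride : Int) : Decidable (Pre_convolve_matrix matrix kernel stride) := by unfold Pre_convolve_matrix; infer_instance

def pvWitness_convolve_matrix : List (List Int) × List (List Int) × Int :=
  ([[1, 2, 3], [4, 5, 6], [7, 8, 9]], [[1, 0], [0, -1]], 1)

def Spec_convolve_matrix (matrix : List (List Int)) (kernel : List (List Int)) (stride : Int) (out : List (List Int)) : Prop := out = convolve_matrix_alt matrix kernel stride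
instance (matrix : List (List Int)) (kernel : List (List Int)) (stride : Int) (out : List (List Int)) : Decidable (Spec_convolve_matrix matrix kernel stride out) := by unfold Spec_convolve_matrix; infer_instance

-- ===== CLAIM (what is proved, stated in full; the proofs are below) =====
def Claim_equal_convolve_matrix : Prop := ∀ (matrix : List (List Int)) (kernel : List (List Int)) (stride : Int), Dom_convolve_matrix matrix kernel stride → Pre_convolve_matrix matrix kernel stride → Spec_convolve_matrix matrix kernel stride (convolve_matrix matrix kernel stride)

-- ===== LEMMAS AND PROOFS =====

-- pvAddCell out a b v adds v at cell (a,b): the step A's innermost loop performs;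
-- pvE out t u reads entry (t,u) with default 0
def pvAddCell (out : List (List Int)) (a b : Nat) (v : Int) : List (List Int) :=
  out.modify a (fun row => row.modify b (fun x => x + v))
def pvE (out : List (List Int)) (t u : Nat) : Int := (out.getD t []).getD u 0

theorem pvE_addCell (out : List (List Int)) (a b t u : Nat) (v : Int) :
    pvE (pvAddCell out a b v) t u =
      if a = t ∧ b = u ∧ t < out.length ∧ u < (out.getD t []).length
      then pvE out t u + v else pvE out t u := by
  by_cases hat : a = t
  · subst hat
    cases hrow : out[a]? with
    | none =>
      have hlen : out.length ≤ a := List.getElem?_eq_none_iff.mp hrow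
      simp only [pvAddCell, pvE, List.getD_eq_getElem?_getD, List.getElem?_modify, hrow,
        Option.map_none, Option.getD_none]
      rw [if_neg (by omega)]
      simp
    | some row =>
      have hlen : a < out.length := (List.getElem?_eq_some_iff.mp hrow).1
      have hgd : out.getD a [] = row := by simp [List.getD_eq_getElem?_getD, hrow]
      by_cases hbu : b = u
      · subst hbu
        cases he : row[b]? with
        | none =>
          have hl2 : row.length ≤ b := List.getElem?_eq_none_iff.mp he
          simp only [pvAddCell, pvE, List.getD_eq_getElem?_getD, List.getElem?_modify, hrow,
            Option.map_some, Option.getD_some, he, Option.getD_none, if_pos rfl, Option.map_none]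
          rw [if_neg (by omega)]
          simp [List.getD_eq_getElem?_getD, hrow, he]
        | some x =>
          have hl2 : b < row.length := (List.getElem?_eq_some_iff.mp he).1
          have hx : row[b] = x := by
            have h2 := he; rw [List.getElem?_eq_getElem hl2] at h2; exact Option.some.inj h2
          simp only [pvAddCell, pvE, List.getD_eq_getElem?_getD, List.getElem?_modify, hrow,
            Option.map_some, Option.getD_some, he, if_pos rfl]
          rw [if_pos ⟨trivial, trivial, hlen, hl2⟩]
          simp [List.getD_eq_getElem?_getD, he, hx]
      · have hmod : (row.modify b fun x => x + v)[u]? = row[u]? := by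
          simp [List.getElem?_modify, hbu]
        simp only [pvAddCell, pvE, List.getD_eq_getElem?_getD, List.getElem?_modify, hrow,
          Option.map_some, Option.getD_some, hmod, if_pos rfl]
        rw [if_neg (by intro h; exact hbu h.2.1)]
        simp [hmod]
  · have hmod : (pvAddCell out a b v)[t]? = out[t]? := by
      simp [pvAddCell, List.getElem?_modify, hat]
    simp only [pvE, List.getD_eq_getElem?_getD, hmod]
    rw [if_neg (by intro h; exact hat h.1)]

theorem pv_rowlen_addCell (out : List (List Int)) (a b t : Nat) (v : Int) :
    ((pvAddCell out a b v).getD t []).length = (out.getD t []).length := by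
  simp only [pvAddCell, List.getD_eq_getElem?_getD, List.getElem?_modify]
  cases hrow : out[t]? <;> by_cases hat : a = t <;> simp [hat]

theorem pv_length_addCell (out : List (List Int)) (a b : Nat) (v : Int) :
    (pvAddCell out a b v).length = out.length := by
  simp [pvAddCell]

theorem pvE_foldl_addCell (l : List Int) (a b t u : Nat) :
    ∀ out, pvE (l.foldl (fun o v => pvAddCell o a b v) out) t u =
      if a = t ∧ b = u ∧ t < out.length ∧ u < (out.getD t []).length
      then pvE out t u + l.sum else pvE out t u := by
  induction l with
  | nil => intro out; simp
  | cons x xs ih =>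
    intro out
    rw [List.foldl_cons, ih]
    by_cases hc : a = t ∧ b = u ∧ t < out.length ∧ u < (out.getD t []).length
    · have hc' : a = t ∧ b = u ∧ t < (pvAddCell out a b x).length ∧ u < ((pvAddCell out a b x).getD t []).length := by
        rw [pv_length_addCell, pv_rowlen_addCell]; exact hc
      rw [if_pos hc', pvE_addCell, if_pos hc, if_pos hc, List.sum_cons]; ring
    · have hc' : ¬(a = t ∧ b = u ∧ t < (pvAddCell out a b x).length ∧ u < ((pvAddCell out a b x).getD t []).length) := by
        rw [pv_length_addCell, pv_rowlen_addCell]; exact hc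
      rw [if_neg hc', pvE_addCell, if_neg hc, if_neg hc]

theorem pv_length_foldl_addCell (l : List Int) (a b : Nat) :
    ∀ out, (l.foldl (fun o v => pvAddCell o a b v) out).length = out.length := by
  induction l with
  | nil => intro out; rfl
  | cons x xs ih => intro out; rw [List.foldl_cons, ih, pv_length_addCell]

theorem pv_rowlen_foldl_addCell (l : List Int) (a b t : Nat) :
    ∀ out, ((l.foldl (fun o v => pvAddCell o a b v) out).getD t []).length = (out.getD t []).length := by
  induction l with
  | nil => intro out; rfl
  | cons x xs ih => intro out; rw [List.foldl_cons, ih, pv_rowlen_addCell]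

theorem pv_kjfold_eq (kjs : List Int) (hk : Int → Int) (a b : Nat) (out : List (List Int)) :
    kjs.foldl (fun o kj => pvAddCell o a b (hk kj)) out
      = (kjs.map hk).foldl (fun o v => pvAddCell o a b v) out := by
  rw [List.foldl_map]

theorem pvE_inner (kis : List Int) (kjs : List Int) (h : Int → Int → Int) (a b t u : Nat) :
    ∀ out, pvE (kis.foldl (fun o ki => kjs.foldl (fun o' kj => pvAddCell o' a b (h ki kj)) o) out) t u =
      if a = t ∧ b = u ∧ t < out.length ∧ u < (out.getD t []).length
      then pvE out t u + (kis.map (fun ki => (kjs.map (h ki)).sum)).sum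
      else pvE out t u := by
  induction kis with
  | nil => intro out; simp
  | cons ki kis ih =>
    intro out
    rw [List.foldl_cons, ih, pv_kjfold_eq]
    by_cases hc : a = t ∧ b = u ∧ t < out.length ∧ u < (out.getD t []).length
    · have hc' : a = t ∧ b = u ∧ t < ((kjs.map (h ki)).foldl (fun o v => pvAddCell o a b v) out).length ∧ u < (((kjs.map (h ki)).foldl (fun o v => pvAddCell o a b v) out).getD t []).length := by
        rw [pv_length_foldl_addCell, pv_rowlen_foldl_addCell]; exact hc
      rw [if_pos hc', pvE_foldl_addCell, if_pos hc, if_pos hc, List.map_cons, List.sum_cons]; ring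
    · have hc' : ¬(a = t ∧ b = u ∧ t < ((kjs.map (h ki)).foldl (fun o v => pvAddCell o a b v) out).length ∧ u < (((kjs.map (h ki)).foldl (fun o v => pvAddCell o a b v) out).getD t []).length) := by
        rw [pv_length_foldl_addCell, pv_rowlen_foldl_addCell]; exact hc
      rw [if_neg hc', pvE_foldl_addCell, if_neg hc, if_neg hc]

theorem pv_length_inner (kis : List Int) (kjs : List Int) (h : Int → Int → Int) (a b : Nat) :
    ∀ out, ((kis.foldl (fun o ki => kjs.foldl (fun o' kj => pvAddCell o' a b (h ki kj)) o) out)).length = out.length := by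
  induction kis with
  | nil => intro out; rfl
  | cons ki kis ih =>
    intro out
    rw [List.foldl_cons, ih, pv_kjfold_eq, pv_length_foldl_addCell]

theorem pv_rowlen_inner (kis : List Int) (kjs : List Int) (h : Int → Int → Int) (a b t : Nat) :
    ∀ out, (((kis.foldl (fun o ki => kjs.foldl (fun o' kj => pvAddCell o' a b (h ki kj)) o) out)).getD t []).length = (out.getD t []).length := by
  induction kis with
  | nil => intro out; rfl
  | cons ki kis ih =>
    intro out
    rw [List.foldl_cons, ih, pv_kjfold_eq, pv_rowlen_foldl_addCell]

theorem pv_length_row (q : Nat) (kis kjs : List Int) (h : Nat → Nat → Int → Int → Int) (a : Nat) :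
    ∀ out, ((List.range q).foldl (fun o b => kis.foldl (fun o' ki => kjs.foldl (fun o'' kj => pvAddCell o'' a b (h a b ki kj)) o') o) out).length = out.length := by
  induction q with
  | zero => intro out; rfl
  | succ q ih =>
    intro out
    rw [List.range_succ, List.foldl_append, List.foldl_cons, List.foldl_nil, pv_length_inner, ih]

theorem pv_rowlen_row (q : Nat) (kis kjs : List Int) (h : Nat → Nat → Int → Int → Int) (a t : Nat) :
    ∀ out, (((List.range q).foldl (fun o b => kis.foldl (fun o' ki => kjs.foldl (fun o'' kj => pvAddCell o'' a b (h a b ki kj)) o') o) out).getD t []).length = (out.getD t []).length := by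
  induction q with
  | zero => intro out; rfl
  | succ q ih =>
    intro out
    rw [List.range_succ, List.foldl_append, List.foldl_cons, List.foldl_nil, pv_rowlen_inner, ih]

theorem pvE_row (q : Nat) (kis kjs : List Int) (h : Nat → Nat → Int → Int → Int) (a t u : Nat) :
    ∀ out, pvE ((List.range q).foldl (fun o b => kis.foldl (fun o' ki => kjs.foldl (fun o'' kj => pvAddCell o'' a b (h a b ki kj)) o') o) out) t u =
      if a = t ∧ u < q ∧ t < out.length ∧ u < (out.getD t []).length
      then pvE out t u + (kis.map (fun ki => (kjs.map (h a u ki)).sum)).sum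
      else pvE out t u := by
  induction q with
  | zero => intro out; rw [if_neg (by omega)]; rfl
  | succ q ih =>
    intro out
    rw [List.range_succ, List.foldl_append, List.foldl_cons, List.foldl_nil, pvE_inner, ih,
      pv_length_row, pv_rowlen_row]
    by_cases hb : t < out.length ∧ u < (out.getD t []).length
    · by_cases hat : a = t
      · subst hat
        by_cases huq : u = q
        · subst huq
          rw [if_pos ⟨rfl, rfl, hb.1, hb.2⟩, if_neg (by omega), if_pos ⟨rfl, by omega, hb.1, hb.2⟩]
        · by_cases huq' : u < q
          · rw [if_neg (by intro hh; exact huq hh.2.1.symm), if_pos ⟨rfl, huq', hb.1, hb.2⟩,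
              if_pos ⟨rfl, by omega, hb.1, hb.2⟩]
          · rw [if_neg (by intro hh; exact huq hh.2.1.symm), if_neg (by omega), if_neg (by omega)]
      · rw [if_neg (by intro hh; exact hat hh.1), if_neg (by intro hh; exact hat hh.1),
          if_neg (by intro hh; exact hat hh.1)]
    · rw [if_neg (by omega), if_neg (by omega), if_neg (by omega)]

theorem pv_length_sweep (p q : Nat) (kis kjs : List Int) (h : Nat → Nat → Int → Int → Int) :
    ∀ out, ((List.range p).foldl (fun o a => (List.range q).foldl (fun o' b => kis.foldl (fun o'' ki => kjs.foldl (fun o''' kj => pvAddCell o''' a b (h a b ki kj)) o'') o') o) out).length = out.length := by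
  induction p with
  | zero => intro out; rfl
  | succ p ih =>
    intro out
    rw [List.range_succ, List.foldl_append, List.foldl_cons, List.foldl_nil, pv_length_row, ih]

theorem pv_rowlen_sweep (p q : Nat) (kis kjs : List Int) (h : Nat → Nat → Int → Int → Int) (t : Nat) :
    ∀ out, (((List.range p).foldl (fun o a => (List.range q).foldl (fun o' b => kis.foldl (fun o'' ki => kjs.foldl (fun o''' kj => pvAddCell o''' a b (h a b ki kj)) o'') o') o) out).getD t []).length = (out.getD t []).length := by
  induction p with
  | zero => intro out; rfl
  | succ p ih =>
    intro out
    rw [List.range_succ, List.foldl_append, List.foldl_cons, List.foldl_nil, pv_rowlen_row, ih]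

theorem pvE_sweep (p q : Nat) (kis kjs : List Int) (h : Nat → Nat → Int → Int → Int) (t u : Nat) :
    ∀ out, pvE ((List.range p).foldl (fun o a => (List.range q).foldl (fun o' b => kis.foldl (fun o'' ki => kjs.foldl (fun o''' kj => pvAddCell o''' a b (h a b ki kj)) o'') o') o) out) t u =
      if t < p ∧ u < q ∧ t < out.length ∧ u < (out.getD t []).length
      then pvE out t u + (kis.map (fun ki => (kjs.map (h t u ki)).sum)).sum
      else pvE out t u := by
  induction p with
  | zero => intro out; rw [if_neg (by omega)]; rfl
  | succ p ih =>
    intro out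
    rw [List.range_succ, List.foldl_append, List.foldl_cons, List.foldl_nil, pvE_row, ih,
      pv_length_sweep, pv_rowlen_sweep]
    by_cases hb : t < out.length ∧ u < (out.getD t []).length
    · by_cases huq : u < q
      · by_cases htp : t = p
        · subst htp
          rw [if_pos ⟨rfl, huq, hb.1, hb.2⟩, if_neg (by omega), if_pos ⟨by omega, huq, hb.1, hb.2⟩]
        · by_cases htp' : t < p
          · rw [if_neg (by intro hh; exact htp hh.1.symm), if_pos ⟨htp', huq, hb.1, hb.2⟩,
              if_pos ⟨by omega, huq, hb.1, hb.2⟩]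
          · rw [if_neg (by intro hh; exact htp hh.1.symm), if_neg (by omega), if_neg (by omega)]
      · rw [if_neg (by omega), if_neg (by omega), if_neg (by omega)]
    · rw [if_neg (by omega), if_neg (by omega), if_neg (by omega)]

theorem pv_count_eq (n s : Int) (hs : 0 < s) :
    (if (0 : Int) < n + 1 then ((n + 1 - 0 + s - 1) / s).toNat else 0) = (PySem.Int.floordiv n s + 1).toNat := by
  rw [PySem.Int.floordiv_eq_ediv_of_pos hs]
  by_cases hn : 0 ≤ n
  · rw [if_pos (by omega)]
    have : n + 1 - 0 + s - 1 = n + 1 * s := by ring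
    rw [this, Int.add_mul_ediv_right n 1 (by omega)]
  · rw [if_neg (by omega)]
    have h1 : n / s < 0 := by
      by_contra hcon
      push_neg at hcon
      have hq : 0 ≤ s * (n / s) := mul_nonneg (by omega) hcon
      have hmod : 0 ≤ n % s := Int.emod_nonneg n (by omega)
      have := Int.ediv_add_emod n s
      omega
    omega

theorem convA_eq (m k : List (List Int)) (s : Int) (hs : 1 ≤ s) :
    convolve_matrix m k s =
      (List.range (PySem.Int.floordiv ((m.length : Int) - (k.length : Int)) s + 1).toNat).foldl
        (fun o a => (List.range (PySem.Int.floordiv (((m.getD 0 []).length : Int) - ((k.getD 0 []).length : Int)) s + 1).toNat).foldl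
          (fun o' b => (PySem.List.pyRange 0 ((k.length : Int)) 1).foldl
            (fun o'' ki => (PySem.List.pyRange 0 (((k.getD 0 []).length : Int)) 1).foldl
              (fun o''' kj => pvAddCell o''' a b
                (PySem.List.pyGetD (PySem.List.pyGetD m (0 + s * (a : Int) + ki) []) (0 + s * (b : Int) + kj) 0 *
                 PySem.List.pyGetD (PySem.List.pyGetD k ki []) kj 0)) o'') o') o)
        ((PySem.List.pyRange 0 (PySem.Int.floordiv ((m.length : Int) - (k.length : Int)) s + 1) 1).map
          (fun _ => (PySem.List.pyRange 0 (PySem.Int.floordiv (((m.getD 0 []).length : Int) - ((k.getD 0 []).length : Int)) s + 1) 1).map (fun _ => (0 : Int)))) := by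
  have hs0 : (0 : Int) < s := by omega
  have hdiv : ∀ (a : Nat), (PySem.Int.floordiv (0 + s * (a : Int)) s).toNat = a := by
    intro a
    rw [PySem.Int.floordiv_eq_ediv_of_pos hs0, zero_add, Int.mul_ediv_cancel_left _ (by omega)]
    simp
  simp only [convolve_matrix, pvAddCell]
  simp only [PySem.List.pyRange_of_pos _ _ hs0, pv_count_eq _ _ hs0, List.foldl_map, hdiv]

theorem pv_getD_map_const (xs : List Int) (c : List Int) (t : Nat) (ht : t < xs.length) :
    ((xs.map (fun _ => c)).getD t []) = c := by
  rw [List.getD_eq_getElem _ _ (by simpa using ht), List.getElem_map]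

theorem pv_getD_map_zero (xs : List Int) (u : Nat) :
    ((xs.map (fun _ => (0 : Int))).getD u 0) = 0 := by
  rcases lt_or_ge u xs.length with h | h
  · rw [List.getD_eq_getElem _ _ (by simpa using h), List.getElem_map]
  · rw [List.getD_eq_default _ _ (by simpa using h)]

-- ===== B-side lemmas: pvUpd shape preservation and per-cell effect =====
theorem pv_length_upd (m : List (List Int)) (s w ki kj : Int) (out : List (List Int)) :
    (pvUpd m s w ki kj out).length = out.length := by
  simp [pvUpd, PySem.List.length_enumerate]

theorem pv_rowlen_upd (m : List (List Int)) (s w ki kj : Int) (out : List (List Int)) (t : Nat) :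
    ((pvUpd m s w ki kj out).getD t []).length = (out.getD t []).length := by
  simp only [pvUpd, List.getD_eq_getElem?_getD, List.getElem?_map, PySem.List.getElem?_enumerate]
  cases hrow : out[t]? with
  | none => simp
  | some row => simp [PySem.List.length_enumerate]

theorem pvE_upd (m : List (List Int)) (s w ki kj : Int) (out : List (List Int)) (t u : Nat) :
    pvE (pvUpd m s w ki kj out) t u =
      if t < out.length ∧ u < (out.getD t []).length
      then pvE out t u + w * PySem.List.pyGetD (PySem.List.pyGetD m ((t : Int) * s + ki) []) ((u : Int) * s + kj) 0
      else pvE out t u := by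
  simp only [pvE, List.getD_eq_getElem?_getD, pvUpd, List.getElem?_map, PySem.List.getElem?_enumerate]
  cases hrow : out[t]? with
  | none =>
    have hlen : out.length ≤ t := List.getElem?_eq_none_iff.mp hrow
    rw [if_neg (by omega)]
    simp
  | some row =>
    have hlen : t < out.length := (List.getElem?_eq_some_iff.mp hrow).1
    simp only [Option.map_some, Option.getD_some, List.getElem?_map, PySem.List.getElem?_enumerate]
    cases he : row[u]? with
    | none =>
      have hl2 : row.length ≤ u := List.getElem?_eq_none_iff.mp he
      rw [if_neg (by simp; omega)]
      simp
    | some x =>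
      have hl2 : u < row.length := (List.getElem?_eq_some_iff.mp he).1
      rw [if_pos (by constructor; omega; simpa using hl2)]
      simp

theorem pv_length_foldB_j (m : List (List Int)) (s ki : Int) (wk : Int → Int → Int) (kjs : List Int) :
    ∀ out, (kjs.foldl (fun o kj => pvUpd m s (wk ki kj) ki kj o) out).length = out.length := by
  induction kjs with
  | nil => intro out; rfl
  | cons kj kjs ih => intro out; rw [List.foldl_cons, ih, pv_length_upd]

theorem pv_rowlen_foldB_j (m : List (List Int)) (s ki : Int) (wk : Int → Int → Int) (kjs : List Int) (t : Nat) :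
    ∀ out, ((kjs.foldl (fun o kj => pvUpd m s (wk ki kj) ki kj o) out).getD t []).length = (out.getD t []).length := by
  induction kjs with
  | nil => intro out; rfl
  | cons kj kjs ih => intro out; rw [List.foldl_cons, ih, pv_rowlen_upd]

theorem pvE_foldB_j (m : List (List Int)) (s ki : Int) (wk : Int → Int → Int) (kjs : List Int) (t u : Nat) :
    ∀ out, pvE (kjs.foldl (fun o kj => pvUpd m s (wk ki kj) ki kj o) out) t u =
      if t < out.length ∧ u < (out.getD t []).length
      then pvE out t u + (kjs.map (fun kj => wk ki kj * PySem.List.pyGetD (PySem.List.pyGetD m ((t : Int) * s + ki) []) ((u : Int) * s + kj) 0)).sum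
      else pvE out t u := by
  induction kjs with
  | nil => intro out; simp
  | cons kj kjs ih =>
    intro out
    rw [List.foldl_cons, ih]
    by_cases hc : t < out.length ∧ u < (out.getD t []).length
    · have hc' : t < (pvUpd m s (wk ki kj) ki kj out).length ∧ u < ((pvUpd m s (wk ki kj) ki kj out).getD t []).length := by
        rw [pv_length_upd, pv_rowlen_upd]; exact hc
      rw [if_pos hc', pvE_upd, if_pos hc, if_pos hc, List.map_cons, List.sum_cons]; ring
    · have hc' : ¬(t < (pvUpd m s (wk ki kj) ki kj out).length ∧ u < ((pvUpd m s (wk ki kj) ki kj out).getD t []).length) := by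
        rw [pv_length_upd, pv_rowlen_upd]; exact hc
      rw [if_neg hc', pvE_upd, if_neg hc, if_neg hc]

theorem pv_length_foldB (m : List (List Int)) (s : Int) (wk : Int → Int → Int) (kis kjs : List Int) :
    ∀ out, (kis.foldl (fun o ki => kjs.foldl (fun o' kj => pvUpd m s (wk ki kj) ki kj o') o) out).length = out.length := by
  induction kis with
  | nil => intro out; rfl
  | cons ki kis ih => intro out; rw [List.foldl_cons, ih, pv_length_foldB_j]

theorem pv_rowlen_foldB (m : List (List Int)) (s : Int) (wk : Int → Int → Int) (kis kjs : List Int) (t : Nat) :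
    ∀ out, ((kis.foldl (fun o ki => kjs.foldl (fun o' kj => pvUpd m s (wk ki kj) ki kj o') o) out).getD t []).length = (out.getD t []).length := by
  induction kis with
  | nil => intro out; rfl
  | cons ki kis ih => intro out; rw [List.foldl_cons, ih, pv_rowlen_foldB_j]

theorem pvE_foldB (m : List (List Int)) (s : Int) (wk : Int → Int → Int) (kis kjs : List Int) (t u : Nat) :
    ∀ out, pvE (kis.foldl (fun o ki => kjs.foldl (fun o' kj => pvUpd m s (wk ki kj) ki kj o') o) out) t u =
      if t < out.length ∧ u < (out.getD t []).length
      then pvE out t u + (kis.map (fun ki => (kjs.map (fun kj => wk ki kj * PySem.List.pyGetD (PySem.List.pyGetD m ((t : Int) * s + ki) []) ((u : Int) * s + kj) 0)).sum)).sum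
      else pvE out t u := by
  induction kis with
  | nil => intro out; simp
  | cons ki kis ih =>
    intro out
    rw [List.foldl_cons, ih]
    by_cases hc : t < out.length ∧ u < (out.getD t []).length
    · have hc' : t < (kjs.foldl (fun o' kj => pvUpd m s (wk ki kj) ki kj o') out).length ∧ u < ((kjs.foldl (fun o' kj => pvUpd m s (wk ki kj) ki kj o') out).getD t []).length := by
        rw [pv_length_foldB_j, pv_rowlen_foldB_j]; exact hc
      rw [if_pos hc', pvE_foldB_j, if_pos hc, if_pos hc, List.map_cons, List.sum_cons]; ring
    · have hc' : ¬(t < (kjs.foldl (fun o' kj => pvUpd m s (wk ki kj) ki kj o') out).length ∧ u < ((kjs.foldl (fun o' kj => pvUpd m s (wk ki kj) ki kj o') out).getD t []).length) := by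
        rw [pv_length_foldB_j, pv_rowlen_foldB_j]; exact hc
      rw [if_neg hc', pvE_foldB_j, if_neg hc, if_neg hc]

theorem conv_main (m k : List (List Int)) (s : Int) (hs : 1 ≤ s) :
    convolve_matrix m k s = convolve_matrix_alt m k s := by
  have hs0 : (0 : Int) < s := by omega
  rw [convA_eq m k s hs]
  simp only [convolve_matrix_alt]
  set RI : Int := PySem.Int.floordiv ((m.length : Int) - (k.length : Int)) s + 1 with hRI
  set CI : Int := PySem.Int.floordiv (((m.getD 0 []).length : Int) - ((k.getD 0 []).length : Int)) s + 1 with hCI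
  set kis : List Int := PySem.List.pyRange 0 ((k.length : Int)) 1 with hkis
  set kjs : List Int := PySem.List.pyRange 0 (((k.getD 0 []).length : Int)) 1 with hkjs
  set zrow : List Int := (PySem.List.pyRange 0 CI 1).map (fun _ => (0 : Int)) with hzrow
  set init : List (List Int) := (PySem.List.pyRange 0 RI 1).map (fun _ => zrow) with hinit
  have h_init_len : init.length = RI.toNat := by
    simp [hinit, PySem.List.length_pyRange_one]
  have h_zrow_len : zrow.length = CI.toNat := by
    simp [hzrow, PySem.List.length_pyRange_one]
  have h_init_getD : ∀ t, t < RI.toNat → init.getD t [] = zrow := by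
    intro t ht
    rw [hinit]
    exact pv_getD_map_const _ _ _ (by simp [PySem.List.length_pyRange_one]; omega)
  have hE0 : ∀ t u, pvE init t u = 0 := by
    intro t u
    unfold pvE
    rcases lt_or_ge t RI.toNat with h | h
    · rw [h_init_getD t h, hzrow, pv_getD_map_zero]
    · have h2 : init.getD t [] = [] := List.getD_eq_default _ _ (by rw [h_init_len]; omega)
      rw [h2]
      rfl
  -- abbreviations for the two fold results
  apply List.ext_getElem
  · rw [pv_length_sweep, pv_length_foldB]
  · intro t ht1 ht2
    have htp : t < RI.toNat := by
      rw [pv_length_sweep, h_init_len] at ht1; exact ht1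
    have hrowB : t < RI.toNat := by
      rw [pv_length_foldB, h_init_len] at ht2; exact ht2
    apply List.ext_getElem
    · rw [← List.getD_eq_getElem _ [] ht1, ← List.getD_eq_getElem _ [] ht2,
        pv_rowlen_sweep, pv_rowlen_foldB]
    · intro u hu1 hu2
      have huq : u < CI.toNat := by
        rw [← List.getD_eq_getElem _ [] ht1, pv_rowlen_sweep, h_init_getD t htp, h_zrow_len] at hu1
        exact hu1
      have hLA : (((List.range RI.toNat).foldl (fun o a => (List.range CI.toNat).foldl (fun o' b => kis.foldl (fun o'' ki => kjs.foldl (fun o''' kj => pvAddCell o''' a b (PySem.List.pyGetD (PySem.List.pyGetD m (0 + s * (a : Int) + ki) []) (0 + s * (b : Int) + kj) 0 * PySem.List.pyGetD (PySem.List.pyGetD k ki []) kj 0)) o'') o') o) init)[t][u]'(by exact hu1)) = pvE ((List.range RI.toNat).foldl (fun o a => (List.range CI.toNat).foldl (fun o' b => kis.foldl (fun o'' ki => kjs.foldl (fun o''' kj => pvAddCell o''' a b (PySem.List.pyGetD (PySem.List.pyGetD m (0 + s * (a : Int) + ki) []) (0 + s * (b : Int) + kj) 0 * PySem.List.pyGetD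 (PySem.List.pyGetD k ki []) kj 0)) o'') o') o) init) t u := by
        unfold pvE
        rw [List.getD_eq_getElem _ [] ht1, List.getD_eq_getElem _ 0 hu1]
      have hLB : ((kis.foldl (fun o ki => kjs.foldl (fun o' kj => pvUpd m s (PySem.List.pyGetD (PySem.List.pyGetD k ki []) kj 0) ki kj o') o) init)[t][u]'(by exact hu2)) = pvE (kis.foldl (fun o ki => kjs.foldl (fun o' kj => pvUpd m s (PySem.List.pyGetD (PySem.List.pyGetD k ki []) kj 0) ki kj o') o) init) t u := by
        unfold pvE
        rw [List.getD_eq_getElem _ [] ht2, List.getD_eq_getElem _ 0 hu2]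
      rw [hLA, hLB, pvE_sweep,
        pvE_foldB m s (fun ki kj => PySem.List.pyGetD (PySem.List.pyGetD k ki []) kj 0) kis kjs t u init]
      have hbnd : t < init.length ∧ u < (init.getD t []).length := by
        constructor
        · omega
        · rw [h_init_getD t htp, h_zrow_len]; exact huq
      rw [if_pos ⟨htp, huq, hbnd.1, hbnd.2⟩, if_pos hbnd, hE0]
      congr 1
      refine congrArg List.sum (List.map_congr_left ?_)
      intro ki _
      refine congrArg List.sum (List.map_congr_left ?_)
      intro kj _
      have h1 : 0 + s * (t : Int) + ki = (t : Int) * s + ki := by ring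
      have h2 : 0 + s * (u : Int) + kj = (u : Int) * s + kj := by ring
      rw [h1, h2, mul_comm]

-- ===== VERDICT (by name: the statement is the Claim_ definition above) =====
theorem convolve_matrix_spec : Claim_equal_convolve_matrix := by
  intro matrix kernel stride _ hpre
  unfold Spec_convolve_matrix
  exact conv_main matrix kernel stride hpre.1
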